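-- pv_equiv track=rewrite | github.com/jliu2006/usaco | train.usaco.org/Chapter_1/S1.4_Greedy_Algos_Winning_Solns/2_Barn_Repair.py | calcBoards
-- ===== SOURCE A (Python) =====
-- def calcBoards(boards, arr, num):
--     diffs = []
--     arr.sort()
--     num -= num-arr[-1]
--     num -= arr[0]-1
--
--     for i in range(len(arr)-1):
--         diffs.append(arr[i+1]-arr[i]-1)
--     diffs.sort()
--     for j in range(1, min(len(arr), boards)):
--         num -= diffs[-j]
--
--     return num
-- ===== SOURCE B (Python) =====
-- def calcBoards(boards, arr, num):
--     # Selection instead of sorting the gaps: repeatedly split the covering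
--     # span at the widest remaining gap (max + remove), no gap sort at all.
--     arr.sort()
--     span = arr[-1] - arr[0] + 1
--     gaps = [arr[i + 1] - arr[i] - 1 for i in range(len(arr) - 1)]
--     for _ in range(min(len(arr), boards) - 1):
--         g = max(gaps)
--         span -= g
--         gaps.remove(g)
--     return span
-- ===== Notes on version B (the rewrite author's own statement) =====
-- stated objective: alternative
-- what changed: B never sorts the gap list: it starts from the single covering span and repeatedly extracts the widest remaining gap by a linear max()+remove() scan (selection), splitting the span there, instead of A's sort of the gaps followed by negative-index subtraction; A's dead num arithmetic is dropped.
import Mathlib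
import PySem

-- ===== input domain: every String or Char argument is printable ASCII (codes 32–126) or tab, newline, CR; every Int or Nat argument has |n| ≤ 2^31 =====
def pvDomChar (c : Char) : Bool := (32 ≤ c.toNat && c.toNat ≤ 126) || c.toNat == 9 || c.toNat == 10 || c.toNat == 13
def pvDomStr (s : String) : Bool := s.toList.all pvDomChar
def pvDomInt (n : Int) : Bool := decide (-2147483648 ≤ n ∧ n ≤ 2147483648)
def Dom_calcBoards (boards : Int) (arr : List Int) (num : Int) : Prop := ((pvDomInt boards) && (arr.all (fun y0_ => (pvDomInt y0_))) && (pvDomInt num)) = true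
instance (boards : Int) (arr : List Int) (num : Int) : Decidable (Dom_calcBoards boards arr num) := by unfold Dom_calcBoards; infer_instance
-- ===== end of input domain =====

-- B is a selection-based alternative: it never sorts the gap list, instead repeatedly
-- extracting the widest remaining gap (linear max + remove) and splitting the span there.
-- Both A and B sort `arr` in place (same mutation); the equivalence proved is about the return value.


-- ===== PORT A =====
def calcBoards (boards : Int) (arr : List Int) (num : Int) : Int :=
  -- diffs = []; arr.sort()
  let arr := PySem.List.sorted arr (fun x => x) false
  -- num -= num-arr[-1]; num -= arr[0]-1   (arr nonempty by Pre_)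
  let num := num - (num - PySem.List.pyGetD arr (-1) 0)
  let num := num - (PySem.List.pyGetD arr 0 0 - 1)
  -- for i in range(len(arr)-1): diffs.append(arr[i+1]-arr[i]-1)
  let diffs := (PySem.List.pyRange 0 (PySem.List.len arr - 1)).foldl
    (fun ds i => ds ++ [PySem.List.pyGetD arr (i + 1) 0 - PySem.List.pyGetD arr i 0 - 1]) []
  -- diffs.sort()
  let diffs := PySem.List.sorted diffs (fun x => x) false
  -- for j in range(1, min(len(arr), boards)): num -= diffs[-j]
  (PySem.List.pyRange 1 (min (PySem.List.len arr) boards)).foldl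
    (fun num j => num - PySem.List.pyGetD diffs (-j) 0) num

-- ===== PORT B =====
def calcBoards_alt (boards : Int) (arr : List Int) (num : Int) : Int :=
  -- arr.sort(); span = arr[-1] - arr[0] + 1
  let arr := PySem.List.sorted arr (fun x => x) false
  let span := PySem.List.pyGetD arr (-1) 0 - PySem.List.pyGetD arr 0 0 + 1
  -- gaps = [arr[i+1]-arr[i]-1 for i in range(len(arr)-1)]
  let gaps := (PySem.List.pyRange 0 (PySem.List.len arr - 1)).map
    (fun i => PySem.List.pyGetD arr (i + 1) 0 - PySem.List.pyGetD arr i 0 - 1)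
  -- for _ in range(min(len(arr), boards) - 1): g = max(gaps); span -= g; gaps.remove(g)
  -- (max() on an empty list would raise; never reached inside Pre_ — the 'none' branch is a totalisation guard)
  let st := (PySem.List.pyRange 0 (min (PySem.List.len arr) boards - 1)).foldl
    (fun (st : Int × List Int) _ =>
      match PySem.List.max? st.2 (fun x => x) with
      | some g => (st.1 - g, (PySem.List.remove? st.2 g).getD st.2)
      | none => st)
    (span, gaps)
  st.1

-- ===== PRECONDITION & SPEC =====
-- Pre_ excludes only the empty list, on which both A and B raise IndexError at arr[-1].
def Pre_calcBoards (boards : Int) (arr : List Int) (num : Int) : Prop := arr ≠ []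
instance (boards : Int) (arr : List Int) (num : Int) : Decidable (Pre_calcBoards boards arr num) := by unfold Pre_calcBoards; infer_instance
def pvWitness_calcBoards : Int × List Int × Int := (2, ([1, 7, 3], 0))

def Spec_calcBoards (boards : Int) (arr : List Int) (num : Int) (out : Int) : Prop := out = calcBoards_alt boards arr num
instance (boards : Int) (arr : List Int) (num : Int) (out : Int) : Decidable (Spec_calcBoards boards arr num out) := by unfold Spec_calcBoards; infer_instance

-- ===== CLAIM (what is proved, stated in full; the proofs are below) =====
def Claim_equal_calcBoards : Prop := ∀ (boards : Int) (arr : List Int) (num : Int), Dom_calcBoards boards arr num → Pre_calcBoards boards arr num → Spec_calcBoards boards arr num (calcBoards boards arr num)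

-- ===== LEMMAS AND PROOFS =====

-- B's loop body, named for the proofs.
def pvStep (st : Int × List Int) : Int × List Int :=
  match PySem.List.max? st.2 (fun x => x) with
  | some g => (st.1 - g, (PySem.List.remove? st.2 g).getD st.2)
  | none => st

-- A fold whose body ignores the element is an iterate.
theorem pv_foldl_const {α β : Type} (l : List β) (f : α → α) (init : α) :
    l.foldl (fun s _ => f s) init = f^[l.length] init := by
  induction l generalizing init with
  | nil => rfl
  | cons x t ih => simpa [Function.iterate_succ_apply] using ih (f init)

-- max(g) is the last element of sorted(g).
theorem pv_max_eq_getLast (g d : List Int)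
    (hd : d = PySem.List.sorted g (fun x => x) false) (hdne : d ≠ []) :
    PySem.List.max? g (fun x => x) = some (d.getLast hdne) := by
  have hne : g ≠ [] := by
    intro h; apply hdne; rw [hd, h]; rfl
  obtain ⟨M, hM⟩ : ∃ M, PySem.List.max? g (fun x => x) = some M := by
    cases hx : PySem.List.max? g (fun x => x) with
    | none => exact absurd ((PySem.List.max?_eq_none_iff g (fun x => x)).mp hx) hne
    | some M => exact ⟨M, rfl⟩
  rw [hM]
  have hMmem : M ∈ g := PySem.List.max?_mem hM
  have hMmax : ∀ y ∈ g, y ≤ M := PySem.List.max?_isMax hM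
  have hperm : d.Perm g := hd ▸ PySem.List.sorted_perm g (fun x => x) false
  have hLmem : d.getLast hdne ∈ g := hperm.mem_iff.mp (List.getLast_mem hdne)
  have hLmax : ∀ y ∈ d, y ≤ d.getLast hdne := by
    intro y hy
    obtain ⟨p, hp, hyp⟩ := List.getElem_of_mem hy
    rw [List.getLast_eq_getElem, ← hyp]
    subst hd
    exact PySem.List.sorted_id_getElem_mono g (by omega) (by omega)
  have h1 : M ≤ d.getLast hdne := hLmax M (hperm.mem_iff.mpr hMmem)
  have h2 : d.getLast hdne ≤ M := hMmax _ hLmem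
  have : M = d.getLast hdne := le_antisymm h1 h2
  rw [this]

-- m iterations of (max + remove) subtract the m largest gaps: the last m of sorted(g).
theorem pv_iterate_step (m : Nat) (x : Int) (g : List Int) (hm : m ≤ g.length) :
    (pvStep^[m] (x, g)).1
      = x - ((PySem.List.sorted g (fun y => y) false).drop (g.length - m)).sum := by
  induction m generalizing x g with
  | zero =>
    rw [Nat.sub_zero,
        List.drop_eq_nil_of_le (le_of_eq (PySem.List.length_sorted g (fun y => y) false))]
    simp
  | succ m ih =>
    have hne : g ≠ [] := by
      intro h; subst h; simp at hm
    set d := PySem.List.sorted g (fun y => y) false with hd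
    have hdne : d ≠ [] := by rw [hd, Ne, PySem.List.sorted_eq_nil_iff]; exact hne
    have hMmemg : d.getLast hdne ∈ g :=
      (PySem.List.sorted_perm g (fun y => y) false).mem_iff.mp (List.getLast_mem hdne)
    set M := d.getLast hdne with hM
    have hstep : pvStep (x, g) = (x - M, g.erase M) := by
      unfold pvStep
      rw [pv_max_eq_getLast g d hd hdne, ← hM]
      simp [PySem.List.remove?_eq_some_erase g M hMmemg]
    rw [Function.iterate_succ_apply, hstep,
        ih (x - M) (g.erase M) (by rw [List.length_erase_of_mem hMmemg]; omega)]
    have hdlen : d.length = g.length := PySem.List.length_sorted g (fun y => y) false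
    have hsplit : d = d.dropLast ++ [M] := by
      rw [hM]; exact (List.dropLast_append_getLast hdne).symm
    have hpermdg : d.Perm g := PySem.List.sorted_perm g (fun y => y) false
    have hperm1 : (d.dropLast).Perm (g.erase M) := by
      have h1 : d.Perm (M :: d.dropLast) := by
        conv_lhs => rw [hsplit]
        exact List.perm_append_singleton M d.dropLast
      have h2 : (d.erase M).Perm (g.erase M) := hpermdg.erase M
      have h3 : (d.erase M).Perm ((M :: d.dropLast).erase M) := h1.erase M
      rw [List.erase_cons_head] at h3
      exact (h3.symm).trans h2
    have hpw : (d.dropLast).Pairwise (· ≤ ·) := by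
      have := PySem.List.sorted_pairwise g (fun y => y)
      exact List.Pairwise.sublist (List.dropLast_sublist d) this
    have hsortedE : PySem.List.sorted (g.erase M) (fun y => y) false = d.dropLast :=
      PySem.List.sorted_id_eq_of_perm_of_pairwise (g.erase M) d.dropLast hperm1 hpw
    rw [hsortedE, List.length_erase_of_mem hMmemg]
    have hk : g.length - 1 - m = g.length - (m + 1) := by omega
    have hdrop : d.drop (g.length - (m + 1))
        = d.dropLast.drop (g.length - (m + 1)) ++ [M] := by
      conv_lhs => rw [hsplit]
      rw [List.drop_append_of_le_length]
      have : d.dropLast.length = g.length - 1 := by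
        rw [List.length_dropLast, hdlen]
      omega
    rw [hk, hdrop, List.sum_append]
    simp; ring

-- A's second loop subtracts the last m elements of diffs (negative indices -1 … -m).
theorem pv_loop_sub (d : List Int) (m : Nat) (hm : m ≤ d.length) (x : Int) :
    (PySem.List.pyRange 1 ((m : Int) + 1)).foldl
      (fun num j => num - PySem.List.pyGetD d (-j) 0) x
      = x - (d.drop (d.length - m)).sum := by
  induction m generalizing x with
  | zero => simp [PySem.List.pyRange_one_eq_nil]
  | succ m ih =>
    have h1 : ((m + 1 : Nat) : Int) + 1 = ((m : Int) + 1) + 1 := by push_cast; ring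
    rw [h1, PySem.List.pyRange_one_succ_right (by omega), List.foldl_append,
        ih (by omega)]
    simp only [List.foldl_cons, List.foldl_nil]
    have h2 : -((m : Int) + 1) = -(((m + 1 : Nat) : Int)) := by push_cast; ring
    rw [h2, PySem.List.pyGetD_neg_natCast d (m + 1) 0 (by omega) hm]
    rw [List.drop_eq_getElem_cons (i := d.length - (m + 1)) (by omega)]
    have h3 : d.length - (m + 1) + 1 = d.length - m := by omega
    rw [h3, List.sum_cons]
    ring

theorem calcBoards_eq (boards : Int) (arr : List Int) (num : Int)
    (hpre : arr ≠ []) :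
    calcBoards boards arr num = calcBoards_alt boards arr num := by
  unfold calcBoards calcBoards_alt
  set s := PySem.List.sorted arr (fun x => x) false with hs_def
  have hs : s ≠ [] := by
    rw [hs_def, Ne, PySem.List.sorted_eq_nil_iff]; exact hpre
  have hL : 1 ≤ s.length := List.length_pos_iff.mpr hs
  simp only [PySem.List.foldl_append_singleton_eq_map, List.nil_append]
  set g := (PySem.List.pyRange 0 (PySem.List.len s - 1)).map
    (fun i => PySem.List.pyGetD s (i + 1) 0 - PySem.List.pyGetD s i 0 - 1) with hg_def
  set d := PySem.List.sorted g (fun x => x) false with hd_def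
  have hglen : g.length = s.length - 1 := by
    rw [hg_def, List.length_map, PySem.List.length_pyRange_one, PySem.List.len_eq]
    omega
  have hspan : num - (num - PySem.List.pyGetD s (-1) 0)
      - (PySem.List.pyGetD s 0 0 - 1)
      = PySem.List.pyGetD s (-1) 0 - PySem.List.pyGetD s 0 0 + 1 := by ring
  set span := PySem.List.pyGetD s (-1) 0 - PySem.List.pyGetD s 0 0 + 1 with hspan_def
  rw [PySem.List.len_eq]
  -- B's foldl is an iterate of pvStep
  have hbodyB : (fun (st : Int × List Int) (_ : Int) =>
      match PySem.List.max? st.2 (fun x => x) with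
      | some gg => (st.1 - gg, (PySem.List.remove? st.2 gg).getD st.2)
      | none => st) = (fun st _ => pvStep st) := rfl
  rcases le_or_gt (min ((s.length : Int)) boards) 1 with hk | hk
  · -- loop count ≤ 0: both loops are empty, both return the span
    rw [PySem.List.pyRange_one_eq_nil hk, List.foldl_nil,
        PySem.List.pyRange_one_eq_nil (by omega), List.foldl_nil]
    exact hspan
  · set m : Nat := (min ((s.length : Int)) boards - 1).toNat with hm_def
    have hmle : m ≤ g.length := by
      have : min ((s.length : Int)) boards ≤ (s.length : Int) := min_le_left _ _
      omega
    have hk1 : min ((s.length : Int)) boards = (m : Int) + 1 := by omega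
    rw [hk1, pv_loop_sub d m (by rw [hd_def, PySem.List.length_sorted]; exact hmle),
        hbodyB, pv_foldl_const, PySem.List.length_pyRange_one]
    have hcnt : (((m : Int) + 1 - 1 - 0).toNat) = m := by omega
    rw [hcnt, pv_iterate_step m span g hmle]
    rw [hd_def, PySem.List.length_sorted]
    omega

-- ===== VERDICT (by name: the statement is the Claim_ definition above) =====
theorem calcBoards_spec : Claim_equal_calcBoards := by
  intro boards arr num _ hpre
  unfold Spec_calcBoards
  exact calcBoards_eq boards arr num hpre
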